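-- pv_equiv track=rewrite | github.com/s0phia-/tetris_for_akshil | tetris.py | calc_lowest_free_rows
-- ===== SOURCE A (Python) =====
-- def calc_lowest_free_rows(representation):
--     """Return lowest filled-row index+1 per column (0 if column empty).
--
--     `representation` may be a list-of-rows or a NumPy 2D array.
--     """
--     num_rows = len(representation)
--     n_cols = len(representation[0]) if num_rows else 0
--     lowest_free_rows = [0] * n_cols
--     for col_ix in range(n_cols):
--         lowest = 0
--         for row_ix in range(num_rows - 1, -1, -1):
--             if representation[row_ix][col_ix]:
--                 lowest = row_ix + 1
--                 break
--         lowest_free_rows[col_ix] = lowest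
--     return lowest_free_rows
-- ===== SOURCE B (Python) =====
-- def calc_lowest_free_rows(representation):
--     n_cols = len(representation[0]) if len(representation) else 0
--     lowest_free_rows = [0] * n_cols
--     for row_ix, row in enumerate(representation, 1):
--         for col_ix, cell in enumerate(row[:n_cols]):
--             if cell:
--                 lowest_free_rows[col_ix] = row_ix
--     return lowest_free_rows
-- ===== Notes on version B (the rewrite author's own statement) =====
-- stated objective: alternative
-- what changed: Replaced A's column-major bottom-up scan with per-column early exit by a single row-major top-down pass that overwrites each column's entry with the current row index at every filled cell.
import Mathlib
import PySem

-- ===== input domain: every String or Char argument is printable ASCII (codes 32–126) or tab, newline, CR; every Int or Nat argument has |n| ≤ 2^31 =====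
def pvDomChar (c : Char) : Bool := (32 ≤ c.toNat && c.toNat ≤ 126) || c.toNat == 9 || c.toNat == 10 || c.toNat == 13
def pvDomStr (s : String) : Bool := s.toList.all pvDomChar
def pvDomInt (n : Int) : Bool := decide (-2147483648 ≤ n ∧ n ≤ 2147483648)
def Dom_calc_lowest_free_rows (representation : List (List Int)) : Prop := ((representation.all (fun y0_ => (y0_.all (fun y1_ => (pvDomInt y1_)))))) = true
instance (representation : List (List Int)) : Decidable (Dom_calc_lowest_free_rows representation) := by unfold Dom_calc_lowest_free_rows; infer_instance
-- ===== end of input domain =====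

-- B replaces A's column-major bottom-up early-exit scan by a row-major top-down
-- overwrite pass (alternative decomposition, same cost).

-- ===== PORT A =====
-- inner loop 'for row_ix in range(num_rows-1,-1,-1): if rep[row_ix][col_ix]: lowest=row_ix+1; break'
-- as structural recursion on the remaining row count; indexing via getD (default 0, falsy) is
-- exact inside Pre_ — there A's scan breaks before reaching any out-of-range cell, on which
-- Python would raise IndexError.
def aScan (rep : List (List Int)) (c : Nat) : Nat → Int
  | 0 => 0
  | k + 1 => if (rep.getD k []).getD c 0 ≠ 0 then ((k : Int) + 1) else aScan rep c k

def calc_lowest_free_rows (representation : List (List Int)) : List Int :=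
  let numRows := representation.length
  let nCols := if numRows ≠ 0 then ((PySem.List.pyGet? representation 0).getD []).length else 0
  (List.range nCols).map (fun c => aScan representation c numRows)

-- ===== PORT B =====
-- 'for col_ix, cell in enumerate(row[:n_cols]): if cell: lowest_free_rows[col_ix] = row_ix'
-- row[:n_cols] = List.take nCols (exact: nonnegative bound from 0); enumerate = List.zipIdx.
def bCols : List (Int × Nat) → Int → List Int → List Int
  | [], _, acc => acc
  | (cell, cix) :: ps, i, acc => bCols ps i (if cell ≠ 0 then acc.set cix i else acc)

-- 'for row_ix, row in enumerate(representation, 1): …'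
def bGo (nCols : Nat) : List (List Int) → List Int → Int → List Int
  | [], acc, _ => acc
  | row :: rest, acc, i => bGo nCols rest (bCols ((row.take nCols).zipIdx) i acc) (i + 1)

def calc_lowest_free_rows_alt (representation : List (List Int)) : List Int :=
  let nCols := if representation.length ≠ 0 then ((PySem.List.pyGet? representation 0).getD []).length else 0
  bGo nCols representation (List.replicate nCols 0) 1

-- ===== PRECONDITION & SPEC =====
-- Pre_ is exactly the set of inputs on which Python A returns (A raises IndexError on ragged
-- grids whenever some column's bottom-up scan reaches a row shorter than the first row before
-- finding a filled cell): every cell position (r, c) with c < n_cols missing from its row must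
-- have a filled in-range cell strictly below it.
def Pre_calc_lowest_free_rows (representation : List (List Int)) : Prop :=
  ∀ r, r < representation.length → ∀ c, c < (representation.headD []).length →
    (representation.getD r []).length ≤ c →
    ∃ r', r' < representation.length ∧ r < r' ∧ c < (representation.getD r' []).length ∧
      (representation.getD r' []).getD c 0 ≠ 0
instance (representation : List (List Int)) : Decidable (Pre_calc_lowest_free_rows representation) := by unfold Pre_calc_lowest_free_rows; infer_instance

def pvWitness_calc_lowest_free_rows : List (List Int) := [[1, 0], [0, 1]]


def Spec_calc_lowest_free_rows (representation : List (List Int)) (out : List Int) : Prop := out = calc_lowest_free_rows_alt representation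
instance (representation : List (List Int)) (out : List Int) : Decidable (Spec_calc_lowest_free_rows representation out) := by unfold Spec_calc_lowest_free_rows; infer_instance

-- ===== CLAIM (what is proved, stated in full; the proofs are below) =====
def Claim_equal_calc_lowest_free_rows : Prop := ∀ (representation : List (List Int)), Dom_calc_lowest_free_rows representation → Pre_calc_lowest_free_rows representation → Spec_calc_lowest_free_rows representation (calc_lowest_free_rows representation)

-- ===== LEMMAS AND PROOFS =====
-- (the equality of the two ports in fact holds for every input; Pre_ marks where port A is
-- faithful to Python A)

theorem aScan_nonneg (rep : List (List Int)) (c : Nat) : ∀ k, 0 ≤ aScan rep c k := by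
  intro k
  induction k with
  | zero => simp [aScan]
  | succ k ih => simp only [aScan]; split_ifs <;> omega

-- peeling a row off the front of A's backward absolute-index scan
theorem aScan_cons (row : List Int) (rest : List (List Int)) (c : Nat) :
    ∀ k : Nat, aScan (row :: rest) c (k + 1) =
      if aScan rest c k ≠ 0 then aScan rest c k + 1
      else (if row.getD c 0 ≠ 0 then 1 else 0) := by
  intro k
  induction k with
  | zero => simp [aScan]
  | succ k ih =>
      simp only [aScan, List.getD_cons_succ] at ih ⊢
      split_ifs at ih ⊢ <;> omega

theorem bCols_length (ps : List (Int × Nat)) : ∀ (i : Int) (acc : List Int),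
    (bCols ps i acc).length = acc.length := by
  induction ps with
  | nil => intro i acc; rfl
  | cons p ps ih =>
      intro i acc
      obtain ⟨v0, c0⟩ := p
      rw [show bCols ((v0, c0) :: ps) i acc = bCols ps i (if v0 ≠ 0 then acc.set c0 i else acc) from rfl, ih]
      split_ifs <;> simp

theorem getD_set_int (l : List Int) (c0 : Nat) (i : Int) (c : Nat) :
    (l.set c0 i).getD c 0 = if c0 = c ∧ c < l.length then i else l.getD c 0 := by
  by_cases hcl : c < l.length
  · simp only [List.getD, List.getElem?_set, List.getElem?_eq_getElem hcl]
    split_ifs <;> simp_all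
  · have h1 : l[c]? = none := by rw [List.getElem?_eq_none_iff]; omega
    have h2 : (l.set c0 i)[c]? = none := by
      rw [List.getElem?_eq_none_iff]; simpa using (by omega : l.length ≤ c)
    rw [List.getD, List.getD, h1, h2, if_neg (fun h => hcl h.2)]

-- every write of one bCols pass stores the same value i, so the order of the writes
-- does not matter: cell c ends at i iff some pair (v, c) with v ≠ 0 occurs in ps
theorem bCols_getD (ps : List (Int × Nat)) : ∀ (i : Int) (acc : List Int) (c : Nat),
    (bCols ps i acc).getD c 0 =
      if (∃ p ∈ ps, p.2 = c ∧ p.1 ≠ 0) ∧ c < acc.length then i else acc.getD c 0 := by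
  induction ps with
  | nil => intro i acc c; simp [bCols]
  | cons p ps ih =>
      intro i acc c
      obtain ⟨v0, c0⟩ := p
      have hiff : (∃ p ∈ (v0, c0) :: ps, p.2 = c ∧ p.1 ≠ 0) ↔
          ((c0 = c ∧ v0 ≠ 0) ∨ ∃ p ∈ ps, p.2 = c ∧ p.1 ≠ 0) := by
        constructor
        · rintro ⟨q, hq, h2, h3⟩
          rcases List.mem_cons.1 hq with h | h
          · subst h; exact Or.inl ⟨h2, h3⟩
          · exact Or.inr ⟨q, h, h2, h3⟩
        · rintro (⟨h2, h3⟩ | ⟨q, h, h2, h3⟩)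
          · exact ⟨(v0, c0), List.mem_cons_self .., h2, h3⟩
          · exact ⟨q, List.mem_cons_of_mem _ h, h2, h3⟩
      rw [show bCols ((v0, c0) :: ps) i acc = bCols ps i (if v0 ≠ 0 then acc.set c0 i else acc) from rfl, ih]
      by_cases hv : v0 = 0
      · rw [if_neg (show ¬v0 ≠ 0 from fun h => h hv)]
        simp only [hiff]
        split_ifs with h1 h2 h2
        · rfl
        · exact absurd ⟨Or.inr h1.1, h1.2⟩ h2
        · rcases h2.1 with h' | h'
          · exact absurd hv h'.2
          · exact absurd ⟨h', h2.2⟩ h1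
        · rfl
      · rw [if_pos (show v0 ≠ 0 from hv)]
        simp only [hiff, List.length_set, getD_set_int]
        split_ifs with h1 h2 h2 h3 h3
        · rfl
        · exact absurd ⟨Or.inr h1.1, h1.2⟩ h2
        · rfl
        · exact absurd ⟨Or.inl ⟨h2.1, hv⟩, h2.2⟩ h3
        · rcases h3.1 with h' | h'
          · exact absurd ⟨h'.1, h3.2⟩ h2
          · exact absurd ⟨h', h3.2⟩ h1
        · rfl

-- the pairs of enumerate(row[:n]) carrying column c: exactly one, iff c is in range and filled
theorem zipIdx_take_exists (row : List Int) (n c : Nat) (hc : c < n) :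
    (∃ p ∈ (row.take n).zipIdx, p.2 = c ∧ p.1 ≠ 0) ↔ row.getD c 0 ≠ 0 := by
  constructor
  · rintro ⟨⟨v, j⟩, hmem, rfl, hv⟩
    rw [List.mk_mem_zipIdx_iff_getElem?] at hmem
    have hj : j < row.length := by
      by_contra h
      rw [List.getElem?_take, List.getElem?_eq_none_iff.2 (by omega)] at hmem
      · simp at hmem
    rw [List.getElem?_take, List.getElem?_eq_getElem hj] at hmem
    rw [List.getD_eq_getElem _ _ hj]
    simp only [Option.ite_none_right_eq_some, Option.some_inj] at hmem
    rw [hmem.2]; exact hv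
  · intro hnz
    have hcl : c < row.length := by
      by_contra h
      rw [List.getD_eq_default _ _ (by omega)] at hnz
      exact hnz rfl
    rw [List.getD_eq_getElem _ _ hcl] at hnz
    refine ⟨(row[c], c), ?_, rfl, hnz⟩
    rw [List.mk_mem_zipIdx_iff_getElem?, List.getElem?_take, List.getElem?_eq_getElem hcl]
    simp [hc]

theorem bGo_length (nCols : Nat) (rs : List (List Int)) : ∀ (acc : List Int) (i : Int),
    (bGo nCols rs acc i).length = acc.length := by
  induction rs with
  | nil => intro acc i; rfl
  | cons row rest ih =>
      intro acc i
      rw [show bGo nCols (row :: rest) acc i =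
        bGo nCols rest (bCols ((row.take nCols).zipIdx) i acc) (i + 1) from rfl, ih, bCols_length]

-- B's forward overwrite pass, per column, equals A's backward scan
theorem bGo_getD (nCols : Nat) (rs : List (List Int)) : ∀ (acc : List Int) (i : Int) (c : Nat),
    acc.length = nCols → c < nCols →
    (bGo nCols rs acc i).getD c 0 =
      if aScan rs c rs.length = 0 then acc.getD c 0
      else (i - 1) + aScan rs c rs.length := by
  induction rs with
  | nil => intro acc i c _ _; simp [bGo, aScan]
  | cons row rest ih =>
      intro acc i c hacc hc
      rw [show bGo nCols (row :: rest) acc i =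
        bGo nCols rest (bCols ((row.take nCols).zipIdx) i acc) (i + 1) from rfl]
      rw [ih _ _ _ (by rw [bCols_length]; exact hacc) hc]
      rw [bCols_getD]
      have hiff2 : ((∃ p ∈ (row.take nCols).zipIdx, p.2 = c ∧ p.1 ≠ 0) ∧ c < acc.length) ↔
          (row.getD c 0 ≠ 0) := by
        rw [zipIdx_take_exists row nCols c hc]
        constructor
        · exact fun h => h.1
        · exact fun h => ⟨h, by omega⟩
      simp only [hiff2]
      rw [show (row :: rest).length = rest.length + 1 from rfl, aScan_cons]
      have hnn := aScan_nonneg rest c rest.length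
      split_ifs <;> omega

-- ===== VERDICT (by name: the statement is the Claim_ definition above) =====
theorem calc_lowest_free_rows_spec : Claim_equal_calc_lowest_free_rows := by
  intro rep _ _
  unfold Spec_calc_lowest_free_rows
  unfold calc_lowest_free_rows calc_lowest_free_rows_alt
  cases rep with
  | nil => rfl
  | cons r0 rest =>
      simp only [List.length_cons, Ne, Nat.succ_ne_zero, not_false_iff, if_true]
      have hget0 : (PySem.List.pyGet? (r0 :: rest) 0).getD [] = r0 := by
        simp [PySem.List.pyGet?, PySem.List.pyIdx?]
      rw [hget0]
      have hL : (bGo r0.length (r0 :: rest) (List.replicate r0.length 0) 1).length = r0.length := by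
        rw [bGo_length, List.length_replicate]
      apply List.ext_getElem
      · simp [hL]
      · intro c hc1 hc2
        have hc : c < r0.length := by simpa using hc1
        have hB := bGo_getD r0.length (r0 :: rest) (List.replicate r0.length 0) 1 c
          (List.length_replicate) hc
        have hBD : (bGo r0.length (r0 :: rest) (List.replicate r0.length 0) 1).getD c 0 =
            (bGo r0.length (r0 :: rest) (List.replicate r0.length 0) 1)[c] := by
          rw [List.getD_eq_getElem _ _ (by rw [hL]; exact hc)]
        have hrepD : (List.replicate r0.length (0 : Int)).getD c 0 = 0 := by
          rw [List.getD_eq_getElem _ _ (by rw [List.length_replicate]; exact hc)]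
          simp
        rw [List.getElem_map, List.getElem_range]
        rw [← hBD, hB, hrepD]
        simp only [List.length_cons]
        split_ifs with h0 <;> omega
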